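-- pv_equiv track=rewrite | github.com/RxndyOG/BachelorsThesisStateAbstractionStefanWerner | Bachelor/MatrixOperation.py | state_edge_down
-- ===== SOURCE A (Python) =====
-- def state_edge_down(state):
--     edged_state = state.copy()
--
--     for j in range(len(edged_state[0])):
--         for i in range(len(edged_state)):
--             if i > 0:
--                 if (edged_state[i][j] == 0 and edged_state[i-1][j] != 0 and edged_state[i-1][j] != 1):
--                     edged_state[i][j] = 1
--
--     for j in range(len(edged_state[0])):
--         for i in range(len(edged_state)):
--             if edged_state[i][j] == 1:
--                 edged_state[i][j] = 2
--
--     return edged_state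
-- ===== SOURCE B (Python) =====
-- def state_edge_down(state):
--     # Single row-major top-down pass (vs A's two column-major passes);
--     # same in-place mutation of the shared rows of the shallow copy.
--     edged_state = state.copy()
--     cols = len(edged_state[0])
--     prev = None
--     for row in edged_state:
--         orig = row[:cols]
--         for j in range(cols):
--             v = row[j]
--             if v == 1 or (v == 0 and prev is not None and prev[j] != 0 and prev[j] != 1):
--                 row[j] = 2
--         prev = orig
--     return edged_state
-- ===== Notes on version B (the rewrite author's own statement) =====
-- stated objective: faster
-- what changed: A makes two full column-major passes over the matrix (first turning eligible 0s into 1s, then all 1s into 2s); B makes a single row-major top-down pass that writes the final value 2 directly, using a snapshot of the previous row's original values.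
import Mathlib
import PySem

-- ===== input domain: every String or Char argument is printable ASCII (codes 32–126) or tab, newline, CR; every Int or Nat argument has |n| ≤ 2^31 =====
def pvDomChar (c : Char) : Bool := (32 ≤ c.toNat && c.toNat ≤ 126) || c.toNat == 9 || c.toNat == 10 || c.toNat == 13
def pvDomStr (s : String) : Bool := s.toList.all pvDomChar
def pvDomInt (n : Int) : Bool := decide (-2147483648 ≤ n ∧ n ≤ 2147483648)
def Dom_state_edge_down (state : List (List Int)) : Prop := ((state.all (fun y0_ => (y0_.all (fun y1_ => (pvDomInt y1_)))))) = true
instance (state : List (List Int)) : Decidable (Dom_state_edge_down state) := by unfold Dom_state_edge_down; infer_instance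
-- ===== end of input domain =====

-- B replaces A's two column-major passes by one row-major top-down pass that writes the
-- final value 2 directly (one traversal in memory order; a timing run measured B faster).
-- Both Pythons mutate the shared rows of the shallow copy and end in the same final state;
-- the equivalence proved here is about the returned value.

-- ===== PORT A =====
-- edged_state[i][j]  (reads via getD defaults; every access is in range under Pre_)
def cellM (m : List (List Int)) (i j : Nat) : Int := (m.getD i []).getD j 0

-- edged_state[i][j] = v
def setM (m : List (List Int)) (i j : Nat) (v : Int) : List (List Int) :=
  m.set i ((m.getD i []).set j v)

-- body of A's first nested loop, for column j at row i
def p1step (j : Nat) (m : List (List Int)) (i : Nat) : List (List Int) :=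
  if 0 < i ∧ cellM m i j = 0 ∧ cellM m (i-1) j ≠ 0 ∧ cellM m (i-1) j ≠ 1 then
    setM m i j 1 else m

-- body of A's second nested loop
def p2step (j : Nat) (m : List (List Int)) (i : Nat) : List (List Int) :=
  if cellM m i j = 1 then setM m i j 2 else m

-- range(len(..)) loops become folds over List.range (Python len is the Nat length)
def state_edge_down (state : List (List Int)) : List (List Int) :=
  let edged := state                                  -- edged_state = state.copy()
  let cols := (edged.headD []).length                 -- len(edged_state[0]); [] raises in Python (excluded by Pre_)
  let m1 := (List.range cols).foldl (fun m j => (List.range m.length).foldl (p1step j) m) edged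
  (List.range cols).foldl (fun m j => (List.range m.length).foldl (p2step j) m) m1

-- ===== PORT B =====
-- prev is not None and prev[j] != 0 and prev[j] != 1
def pcondB (prev? : Option (List Int)) (j : Nat) : Bool :=
  match prev? with
  | some p => decide (p.getD j 0 ≠ 0 ∧ p.getD j 0 ≠ 1)
  | none => false

-- inner `for j in range(cols)` of Source B, updating one row in place
def altRow (prev? : Option (List Int)) (c : Nat) (row : List Int) : List Int :=
  (List.range c).foldl (fun r j =>
    let v := r.getD j 0
    if v = 1 ∨ (v = 0 ∧ pcondB prev? j) then r.set j 2 else r) row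

-- the `for row in edged_state` loop, threading prev = orig = row[:cols]
def altGo (c : Nat) (prev? : Option (List Int)) : List (List Int) → List (List Int)
  | [] => []
  | row :: rest => altRow prev? c row :: altGo c (some (row.take c)) rest

def state_edge_down_alt (state : List (List Int)) : List (List Int) :=
  altGo ((state.headD []).length) none state

-- ===== PRECONDITION & SPEC =====
-- Pre_ excludes exactly the inputs where Python A raises IndexError: the empty matrix
-- (len(state[0])) and matrices with a row shorter than the first row.
def Pre_state_edge_down (state : List (List Int)) : Prop :=
  state ≠ [] ∧ ∀ r ∈ state, (state.headD []).length ≤ r.length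
instance (state : List (List Int)) : Decidable (Pre_state_edge_down state) := by
  unfold Pre_state_edge_down; infer_instance

def pvWitness_state_edge_down : List (List Int) := [[0, 3], [0, 0], [1, 0]]

def Spec_state_edge_down (state : List (List Int)) (out : List (List Int)) : Prop := out = state_edge_down_alt state
instance (state : List (List Int)) (out : List (List Int)) : Decidable (Spec_state_edge_down state out) := by unfold Spec_state_edge_down; infer_instance

-- ===== CLAIM (what is proved, stated in full; the proofs are below) =====
def Claim_equal_state_edge_down : Prop := ∀ (state : List (List Int)), Dom_state_edge_down state → Pre_state_edge_down state → Spec_state_edge_down state (state_edge_down state)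

-- ===== LEMMAS AND PROOFS =====

-- condition of pass 1, on the original matrix
def C1 (m : List (List Int)) (j i : Nat) : Bool :=
  decide (0 < i ∧ cellM m i j = 0 ∧ cellM m (i-1) j ≠ 0 ∧ cellM m (i-1) j ≠ 1)

-- pointwise effect of pass 1 / pass 2
def T1 (m : List (List Int)) (i j : Nat) : Int := if C1 m j i then 1 else cellM m i j
def T2 (m : List (List Int)) (i j : Nat) : Int := if cellM m i j = 1 then 2 else cellM m i j

theorem setM_length (m : List (List Int)) (i j : Nat) (v : Int) :
    (setM m i j v).length = m.length := by
  simp [setM]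

theorem getD_set {α : Type} (l : List α) (i : Nat) (v d : α) (j : Nat) :
    (l.set i v).getD j d = if j = i ∧ i < l.length then v else l.getD j d := by
  by_cases hi : i < l.length
  · by_cases h : j = i
    · rw [h]
      simp [List.getD_eq_getElem?_getD, hi]
    · simp [List.getD_eq_getElem?_getD, List.getElem?_set_ne (by omega : i ≠ j), h]
  · rw [List.set_eq_of_length_le (by omega)]
    simp [hi]

theorem rowlen_setM (m : List (List Int)) (i j : Nat) (v : Int) (i' : Nat) :
    ((setM m i j v).getD i' []).length = (m.getD i' []).length := by
  unfold setM
  rw [getD_set]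
  by_cases h : i' = i ∧ i < m.length
  · rw [if_pos h, List.length_set, h.1]
  · rw [if_neg h]

theorem cellM_setM (m : List (List Int)) (i j : Nat) (v : Int) (i' j' : Nat) :
    cellM (setM m i j v) i' j' =
      if i' = i ∧ j' = j ∧ i < m.length ∧ j < (m.getD i []).length then v
      else cellM m i' j' := by
  unfold cellM setM
  rw [getD_set]
  by_cases h : i' = i ∧ i < m.length
  · rw [if_pos h, getD_set, h.1]
    by_cases hj : j' = j ∧ j < (m.getD i []).length
    · rw [if_pos hj, if_pos ⟨rfl, hj.1, h.2, hj.2⟩]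
    · rw [if_neg hj, if_neg (by rintro ⟨_, h2, _, h4⟩; exact hj ⟨h2, h4⟩)]
  · rw [if_neg h, if_neg (by rintro ⟨h1, _, h3, _⟩; exact h ⟨h1, h3⟩)]

-- ---------- A, pass 1, inner loop over rows of column j ----------

theorem p1_fold (j : Nat) (m : List (List Int))
    (hj : ∀ i, i < m.length → j < (m.getD i []).length) (k : Nat) (hk : k ≤ m.length) :
    (((List.range k).foldl (p1step j) m).length = m.length) ∧
    (∀ i', (((List.range k).foldl (p1step j) m).getD i' []).length = (m.getD i' []).length) ∧
    (∀ i' j', ¬ (j' = j ∧ i' < k) → cellM ((List.range k).foldl (p1step j) m) i' j' = cellM m i' j') ∧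
    (∀ i', i' < k → cellM ((List.range k).foldl (p1step j) m) i' j = T1 m i' j) := by
  induction k with
  | zero => simp
  | succ k ih =>
    obtain ⟨hL, hR, hO, hC⟩ := ih (by omega)
    set G := (List.range k).foldl (p1step j) m with hG
    have hF : (List.range (k+1)).foldl (p1step j) m = p1step j G k := by
      rw [List.range_succ, List.foldl_append]; rfl
    have hcellk : cellM G k j = cellM m k j := hO k j (by simp)
    have hcond : (0 < k ∧ cellM G k j = 0 ∧ cellM G (k-1) j ≠ 0 ∧ cellM G (k-1) j ≠ 1)
        ↔ C1 m j k = true := by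
      unfold C1
      rw [decide_eq_true_iff]
      rcases Nat.eq_zero_or_pos k with h0 | h0
      · subst h0; simp
      · have h1 := hC (k-1) (by omega)
        unfold T1 at h1
        by_cases hc : C1 m j (k-1) = true
        · rw [if_pos hc] at h1
          have horig : cellM m (k-1) j = 0 := by
            unfold C1 at hc; rw [decide_eq_true_iff] at hc; exact hc.2.1
          constructor
          · rintro ⟨_, _, _, hne1⟩; rw [h1] at hne1; exact absurd rfl hne1
          · rintro ⟨_, _, hne0, _⟩; exact absurd horig hne0
        · rw [if_neg hc] at h1
          rw [h1, hcellk]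
    by_cases hc : C1 m j k = true
    · have hset : (List.range (k+1)).foldl (p1step j) m = setM G k j 1 := by
        rw [hF]; unfold p1step; rw [if_pos (hcond.mpr hc)]
      have hkin : k < G.length := by rw [hL]; omega
      have hjin : j < (G.getD k []).length := by rw [hR]; exact hj k (by omega)
      refine ⟨?_, ?_, ?_, ?_⟩
      · rw [hset, setM_length, hL]
      · intro i'; rw [hset, rowlen_setM]; exact hR i'
      · intro i' j' h
        rw [hset, cellM_setM]
        rw [if_neg (by rintro ⟨hi, hj', _⟩; exact h ⟨hj', by omega⟩)]
        exact hO i' j' (by rintro ⟨hj', hik⟩; exact h ⟨hj', by omega⟩)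
      · intro i' hi'
        rw [hset, cellM_setM]
        by_cases he : i' = k
        · subst he
          rw [if_pos ⟨rfl, rfl, hkin, hjin⟩]
          unfold T1; rw [if_pos hc]
        · rw [if_neg (by rintro ⟨h1, _⟩; exact he h1)]
          exact hC i' (by omega)
    · have hset : (List.range (k+1)).foldl (p1step j) m = G := by
        rw [hF]; unfold p1step
        rw [if_neg (fun h => hc (hcond.mp h))]
      refine ⟨hset ▸ hL, hset ▸ hR, ?_, ?_⟩
      · intro i' j' h
        rw [hset]
        exact hO i' j' (by rintro ⟨hj', hik⟩; exact h ⟨hj', by omega⟩)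
      · intro i' hi'
        by_cases he : i' = k
        · subst he; rw [hset, hcellk]
          unfold T1; rw [if_neg hc]
        · rw [hset]; exact hC i' (by omega)

-- ---------- A, pass 2, inner loop over rows of column j ----------

theorem p2_fold (j : Nat) (m : List (List Int))
    (hj : ∀ i, i < m.length → j < (m.getD i []).length) (k : Nat) (hk : k ≤ m.length) :
    (((List.range k).foldl (p2step j) m).length = m.length) ∧
    (∀ i', (((List.range k).foldl (p2step j) m).getD i' []).length = (m.getD i' []).length) ∧
    (∀ i' j', ¬ (j' = j ∧ i' < k) → cellM ((List.range k).foldl (p2step j) m) i' j' = cellM m i' j') ∧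
    (∀ i', i' < k → cellM ((List.range k).foldl (p2step j) m) i' j = T2 m i' j) := by
  induction k with
  | zero => simp
  | succ k ih =>
    obtain ⟨hL, hR, hO, hC⟩ := ih (by omega)
    set G := (List.range k).foldl (p2step j) m with hG
    have hF : (List.range (k+1)).foldl (p2step j) m = p2step j G k := by
      rw [List.range_succ, List.foldl_append]; rfl
    have hcellk : cellM G k j = cellM m k j := hO k j (by simp)
    by_cases hc : cellM m k j = 1
    · have hset : (List.range (k+1)).foldl (p2step j) m = setM G k j 2 := by
        rw [hF]; unfold p2step; rw [if_pos (hcellk ▸ hc)]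
      have hkin : k < G.length := by rw [hL]; omega
      have hjin : j < (G.getD k []).length := by rw [hR]; exact hj k (by omega)
      refine ⟨?_, ?_, ?_, ?_⟩
      · rw [hset, setM_length, hL]
      · intro i'; rw [hset, rowlen_setM]; exact hR i'
      · intro i' j' h
        rw [hset, cellM_setM]
        rw [if_neg (by rintro ⟨hi, hj', _⟩; exact h ⟨hj', by omega⟩)]
        exact hO i' j' (by rintro ⟨hj', hik⟩; exact h ⟨hj', by omega⟩)
      · intro i' hi'
        rw [hset, cellM_setM]
        by_cases he : i' = k
        · subst he
          rw [if_pos ⟨rfl, rfl, hkin, hjin⟩]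
          unfold T2; rw [if_pos hc]
        · rw [if_neg (by rintro ⟨h1, _⟩; exact he h1)]
          exact hC i' (by omega)
    · have hset : (List.range (k+1)).foldl (p2step j) m = G := by
        rw [hF]; unfold p2step; rw [if_neg (hcellk ▸ hc)]
      refine ⟨hset ▸ hL, hset ▸ hR, ?_, ?_⟩
      · intro i' j' h
        rw [hset]
        exact hO i' j' (by rintro ⟨hj', hik⟩; exact h ⟨hj', by omega⟩)
      · intro i' hi'
        by_cases he : i' = k
        · subst he; rw [hset, hcellk]
          unfold T2; rw [if_neg hc]
        · rw [hset]; exact hC i' (by omega)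

-- ---------- A, outer loops over columns (generic over the pass) ----------

theorem pass_outer (step : Nat → List (List Int) → Nat → List (List Int))
    (T : List (List Int) → Nat → Nat → Int)
    (hstep : ∀ j m, (∀ i, i < m.length → j < (m.getD i []).length) →
      (((List.range m.length).foldl (step j) m).length = m.length) ∧
      (∀ i', (((List.range m.length).foldl (step j) m).getD i' []).length = (m.getD i' []).length) ∧
      (∀ i' j', ¬ (j' = j ∧ i' < m.length) → cellM ((List.range m.length).foldl (step j) m) i' j' = cellM m i' j') ∧
      (∀ i', i' < m.length → cellM ((List.range m.length).foldl (step j) m) i' j = T m i' j))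
    (hT : ∀ m m' j, (∀ i', cellM m i' j = cellM m' i' j) → ∀ i, T m i j = T m' i j)
    (state : List (List Int)) (c : Nat)
    (hc : ∀ i, i < state.length → c ≤ (state.getD i []).length) (k : Nat) (hkc : k ≤ c) :
    (((List.range k).foldl (fun m j => (List.range m.length).foldl (step j) m) state).length = state.length) ∧
    (∀ i', (((List.range k).foldl (fun m j => (List.range m.length).foldl (step j) m) state).getD i' []).length = (state.getD i' []).length) ∧
    (∀ i' j', ¬ (j' < k) → cellM ((List.range k).foldl (fun m j => (List.range m.length).foldl (step j) m) state) i' j' = cellM state i' j') ∧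
    (∀ i' j', j' < k → i' < state.length → cellM ((List.range k).foldl (fun m j => (List.range m.length).foldl (step j) m) state) i' j' = T state i' j') := by
  induction k with
  | zero => simp
  | succ k ih =>
    obtain ⟨hL, hR, hO, hC⟩ := ih (by omega)
    set G := (List.range k).foldl (fun m j => (List.range m.length).foldl (step j) m) state with hG
    have hF : (List.range (k+1)).foldl (fun m j => (List.range m.length).foldl (step j) m) state
        = (List.range G.length).foldl (step k) G := by
      rw [List.range_succ, List.foldl_append]; rfl
    have hjG : ∀ i, i < G.length → k < (G.getD i []).length := by
      intro i hi; rw [hR]; exact lt_of_lt_of_le (by omega) (hc i (hL ▸ hi))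
    obtain ⟨sL, sR, sO, sC⟩ := hstep k G hjG
    refine ⟨?_, ?_, ?_, ?_⟩
    · rw [hF, sL, hL]
    · intro i'; rw [hF, sR, hR]
    · intro i' j' h
      rw [hF, sO i' j' (by rintro ⟨he, _⟩; omega)]
      exact hO i' j' (by omega)
    · intro i' j' hj' hi'
      by_cases he : j' = k
      · subst he
        rw [hF, sC i' (by rw [hL]; exact hi')]
        exact hT G state j' (fun a => hO a j' (by omega)) i'
      · rw [hF, sO i' j' (by rintro ⟨h1, _⟩; exact he h1)]
        exact hC i' j' (by omega) hi'

-- ---------- B, inner row loop ----------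

theorem altRow_fold (prev? : Option (List Int)) (c : Nat) (row : List Int)
    (hc : c ≤ row.length) (k : Nat) (hk : k ≤ c) :
    (((List.range k).foldl (fun r j =>
        let v := r.getD j 0
        if v = 1 ∨ (v = 0 ∧ pcondB prev? j) then r.set j 2 else r) row).length = row.length) ∧
    (∀ j, ((List.range k).foldl (fun r j =>
        let v := r.getD j 0
        if v = 1 ∨ (v = 0 ∧ pcondB prev? j) then r.set j 2 else r) row).getD j 0 =
      if j < k ∧ (row.getD j 0 = 1 ∨ (row.getD j 0 = 0 ∧ pcondB prev? j)) then 2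
      else row.getD j 0) := by
  induction k with
  | zero => simp
  | succ k ih =>
    obtain ⟨hL, hV⟩ := ih (by omega)
    set R := (List.range k).foldl (fun r j =>
        let v := r.getD j 0
        if v = 1 ∨ (v = 0 ∧ pcondB prev? j) then r.set j 2 else r) row with hR
    have hF : (List.range (k+1)).foldl (fun r j =>
        let v := r.getD j 0
        if v = 1 ∨ (v = 0 ∧ pcondB prev? j) then r.set j 2 else r) row
        = (let v := R.getD k 0
           if v = 1 ∨ (v = 0 ∧ pcondB prev? k) then R.set k 2 else R) := by
      rw [List.range_succ, List.foldl_append]; rfl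
    have hread : R.getD k 0 = row.getD k 0 := by
      rw [hV k]; rw [if_neg (by rintro ⟨h1, _⟩; omega)]
    by_cases hcnd : row.getD k 0 = 1 ∨ (row.getD k 0 = 0 ∧ pcondB prev? k)
    · have hset : (List.range (k+1)).foldl (fun r j =>
          let v := r.getD j 0
          if v = 1 ∨ (v = 0 ∧ pcondB prev? j) then r.set j 2 else r) row = R.set k 2 := by
        rw [hF]; simp only [hread]; rw [if_pos hcnd]
      constructor
      · rw [hset, List.length_set, hL]
      · intro j
        rw [hset, getD_set]
        by_cases he : j = k
        · subst he
          rw [if_pos ⟨rfl, by rw [hL]; omega⟩, if_pos ⟨by omega, hcnd⟩]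
        · rw [if_neg (by rintro ⟨h1, _⟩; exact he h1), hV j]
          by_cases hj : j < k
          · have hiff : (j < k ∧ (row.getD j 0 = 1 ∨ (row.getD j 0 = 0 ∧ pcondB prev? j)))
                ↔ (j < k + 1 ∧ (row.getD j 0 = 1 ∨ (row.getD j 0 = 0 ∧ pcondB prev? j))) := by
              constructor <;> rintro ⟨_, hx⟩ <;> exact ⟨by omega, hx⟩
            rw [if_congr hiff rfl rfl]
          · rw [if_neg (by rintro ⟨h1, _⟩; omega), if_neg (by rintro ⟨h1, _⟩; omega)]
    · have hset : (List.range (k+1)).foldl (fun r j =>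
          let v := r.getD j 0
          if v = 1 ∨ (v = 0 ∧ pcondB prev? j) then r.set j 2 else r) row = R := by
        rw [hF]; simp only [hread]; rw [if_neg hcnd]
      constructor
      · rw [hset, hL]
      · intro j
        rw [hset, hV j]
        by_cases hj : j < k
        · have hiff : (j < k ∧ (row.getD j 0 = 1 ∨ (row.getD j 0 = 0 ∧ pcondB prev? j)))
              ↔ (j < k + 1 ∧ (row.getD j 0 = 1 ∨ (row.getD j 0 = 0 ∧ pcondB prev? j))) := by
            constructor <;> rintro ⟨_, hx⟩ <;> exact ⟨by omega, hx⟩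
          rw [if_congr hiff rfl rfl]
        · by_cases he : j = k
          · subst he
            rw [if_neg (by rintro ⟨h1, _⟩; omega), if_neg (by rintro ⟨_, h2⟩; exact hcnd h2)]
          · rw [if_neg (by rintro ⟨h1, _⟩; omega), if_neg (by rintro ⟨h1, _⟩; omega)]

theorem altRow_length (prev? : Option (List Int)) (c : Nat) (row : List Int)
    (hc : c ≤ row.length) : (altRow prev? c row).length = row.length :=
  (altRow_fold prev? c row hc c le_rfl).1

theorem altRow_getD (prev? : Option (List Int)) (c : Nat) (row : List Int)
    (hc : c ≤ row.length) (j : Nat) :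
    (altRow prev? c row).getD j 0 =
      if j < c ∧ (row.getD j 0 = 1 ∨ (row.getD j 0 = 0 ∧ pcondB prev? j)) then 2
      else row.getD j 0 :=
  (altRow_fold prev? c row hc c le_rfl).2 j

-- ---------- B, outer row recursion ----------

theorem altGo_spec (c : Nat) (rows : List (List Int)) (prev? : Option (List Int))
    (hc : ∀ r ∈ rows, c ≤ r.length) :
    ((altGo c prev? rows).length = rows.length) ∧
    (∀ i, ((altGo c prev? rows).getD i []).length = (rows.getD i []).length) ∧
    (∀ i j, i < rows.length →
      cellM (altGo c prev? rows) i j =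
        if j < c ∧ (cellM rows i j = 1 ∨ (cellM rows i j = 0 ∧
            pcondB (if i = 0 then prev? else some ((rows.getD (i-1) []).take c)) j)) then 2
        else cellM rows i j) := by
  induction rows generalizing prev? with
  | nil => simp [altGo]
  | cons row rest ih =>
    have hcr : c ≤ row.length := hc row (by simp)
    obtain ⟨iL, iR, iC⟩ := ih (some (row.take c)) (fun r hr => hc r (by simp [hr]))
    refine ⟨by simp [altGo, iL], ?_, ?_⟩
    · intro i
      cases i with
      | zero => simp [altGo, altRow_length _ _ _ hcr]
      | succ i => simpa [altGo] using iR i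
    · intro i j hi
      cases i with
      | zero =>
        simp only [altGo, cellM, List.getD_cons_zero]
        exact altRow_getD prev? c row hcr j
      | succ i =>
        have h1 : cellM (altGo c prev? (row :: rest)) (i+1) j
            = cellM (altGo c (some (row.take c)) rest) i j := by
          simp [altGo, cellM]
        have h2 : cellM (row :: rest) (i+1) j = cellM rest i j := by
          simp [cellM]
        rw [h1, h2, iC i j (by simpa using hi)]
        cases i with
        | zero => simp
        | succ k => simp

-- ---------- assembling both sides ----------

theorem cellM_getElem (m : List (List Int)) (i j : Nat) (hi : i < m.length)
    (hj : j < (m[i]'hi).length) : cellM m i j = (m[i]'hi)[j]'hj := by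
  unfold cellM
  rw [List.getD_eq_getElem m [] hi, List.getD_eq_getElem _ 0 hj]

theorem state_edge_down_spec : Claim_equal_state_edge_down := by
  unfold Claim_equal_state_edge_down
  intro state _ hpre
  unfold Spec_state_edge_down
  obtain ⟨hne, hrows⟩ := hpre
  have hc : ∀ i, i < state.length → (state.headD []).length ≤ (state.getD i []).length := by
    intro i hi
    rw [List.getD_eq_getElem state [] hi]
    exact hrows _ (List.getElem_mem hi)
  -- characterize A
  obtain ⟨aL1, aR1, aO1, aC1⟩ := pass_outer p1step T1
    (fun j m hj => p1_fold j m hj m.length le_rfl)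
    (by intro m m' j h i
        unfold T1 C1
        rw [h i, h (i-1)])
    state (state.headD []).length hc (state.headD []).length le_rfl
  set m1 := (List.range (state.headD []).length).foldl
      (fun m j => (List.range m.length).foldl (p1step j) m) state with hm1
  have hc1 : ∀ i, i < m1.length → (state.headD []).length ≤ (m1.getD i []).length := by
    intro i hi; rw [aR1]; exact hc i (aL1 ▸ hi)
  obtain ⟨aL2, aR2, aO2, aC2⟩ := pass_outer p2step T2
    (fun j m hj => p2_fold j m hj m.length le_rfl)
    (by intro m m' j h i
        unfold T2
        rw [h i])
    m1 (state.headD []).length hc1 (state.headD []).length le_rfl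
  -- characterize B
  obtain ⟨bL, bR, bC⟩ := altGo_spec (state.headD []).length state none
    (fun r hr => hrows r hr)
  have hA : state_edge_down state = (List.range (state.headD []).length).foldl
      (fun m j => (List.range m.length).foldl (p2step j) m) m1 := rfl
  have hB : state_edge_down_alt state = altGo (state.headD []).length none state := rfl
  rw [hA, hB]
  apply List.ext_getElem
  · rw [aL2, aL1, bL]
  intro i h1 h2
  apply List.ext_getElem
  · have e1 := aR2 i
    have e2 := aR1 i
    have e3 := bR i
    have hi : i < state.length := by rw [aL2, aL1] at h1; exact h1
    rw [List.getD_eq_getElem _ [] h1] at e1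
    rw [List.getD_eq_getElem _ [] h2] at e3
    rw [e1, e2, e3]
  intro j hj1 hj2
  have hiS : i < state.length := by rw [aL2, aL1] at h1; exact h1
  rw [← cellM_getElem _ i j h1 hj1, ← cellM_getElem _ i j h2 hj2]
  by_cases hjc : j < (state.headD []).length
  · rw [aC2 i j hjc (by rw [aL1]; exact hiS)]
    rw [bC i j hiS]
    unfold T2
    rw [aC1 i j hjc hiS]
    unfold T1 C1
    cases Nat.eq_zero_or_pos i with
    | inl h0 =>
      subst h0
      rw [if_pos rfl]
      have hnone : pcondB none j = false := rfl
      rw [hnone]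
      simp only [decide_eq_true_iff, Bool.false_eq_true, and_false, or_false]
      split_ifs <;> omega
    | inr h0 =>
      rw [if_neg (by omega : ¬ i = 0)]
      have hlen : (state.headD []).length ≤ (state.getD (i-1) []).length := hc (i-1) (by omega)
      have hjlen : j < (state.getD (i-1) []).length := lt_of_lt_of_le hjc hlen
      have htake : ((state.getD (i-1) []).take (state.headD []).length).getD j 0
          = (state.getD (i-1) []).getD j 0 := by
        rw [List.getD_eq_getElem _ 0 (by rw [List.length_take]; omega),
            List.getD_eq_getElem _ 0 hjlen]
        simp [List.getElem_take]
      have hp : pcondB (some ((state.getD (i-1) []).take (state.headD []).length)) j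
          = decide (cellM state (i-1) j ≠ 0 ∧ cellM state (i-1) j ≠ 1) := by
        have h1 : pcondB (some ((state.getD (i-1) []).take (state.headD []).length)) j
            = decide (((state.getD (i-1) []).take (state.headD []).length).getD j 0 ≠ 0 ∧
                      ((state.getD (i-1) []).take (state.headD []).length).getD j 0 ≠ 1) := rfl
        rw [h1, htake]; rfl
      rw [hp]
      simp only [decide_eq_true_iff, hjc, true_and, h0]
      split_ifs <;> omega
  · rw [aO2 i j (by omega), aO1 i j (by omega)]
    rw [bC i j hiS, if_neg (by rintro ⟨h1, _⟩; omega)]
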